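-- pv_equiv track=rewrite | github.com/RAJUS248/Data-Structure-and-Algorithms | 03_Strings/27_find 1st letr and 1st num.py | first_all
-- ===== SOURCE A (Python) =====
-- def first_all(s):
--
--     if s is None:
--         return ""
--
--     letr = ""
--     num = ""
--     prev = s[0]
--
--     if prev.isalpha():
--         letr += prev
--
--     else:
--         num += prev
--
--     for i in range(1,len(s)):
--
--         cur = s[i]
--
--         if ( cur.isalpha() and prev.isdigit() ) or (cur.isdigit() and prev.isalpha()):
--
--             if cur.isalpha():
--                 letr += s[i]
--
--
--             else:
--                 num += s[i]
--
--         prev = cur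
--
--     return letr + num
-- ===== SOURCE B (Python) =====
-- def _cls(c):
--     return 'a' if c.isalpha() else ('d' if c.isdigit() else 'o')
--
-- def _runs(chars):
--     # run-length compression: (class, first char of run) for each maximal run
--     runs = []
--     for c in chars:
--         k = _cls(c)
--         if runs and runs[-1][0] == k:
--             continue
--         runs.append((k, c))
--     return runs
--
-- def first_all(s):
--     if s is None:
--         return ""
--     runs = _runs(list(s))
--     k0, c0 = runs[0]  # IndexError on empty, like A's s[0]
--     letr = [c0] if k0 == 'a' else []
--     num = [] if k0 == 'a' else [c0]
--     for (pk, _), (k, c) in zip(runs, runs[1:]):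
--         if pk == 'd' and k == 'a':
--             letr.append(c)
--         elif pk == 'a' and k == 'd':
--             num.append(c)
--     return "".join(letr) + "".join(num)
-- ===== Notes on version B (the rewrite author's own statement) =====
-- stated objective: alternative
-- what changed: Replaces A's single stateful character loop (prev carried across iterations) with a two-phase run-length decomposition: a recursive helper compresses the string into maximal class runs (alpha/digit/other, keeping each run's first character), then a scan over adjacent run pairs emits the digit-to-alpha targets into letr and alpha-to-digit targets into num.
import Mathlib
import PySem

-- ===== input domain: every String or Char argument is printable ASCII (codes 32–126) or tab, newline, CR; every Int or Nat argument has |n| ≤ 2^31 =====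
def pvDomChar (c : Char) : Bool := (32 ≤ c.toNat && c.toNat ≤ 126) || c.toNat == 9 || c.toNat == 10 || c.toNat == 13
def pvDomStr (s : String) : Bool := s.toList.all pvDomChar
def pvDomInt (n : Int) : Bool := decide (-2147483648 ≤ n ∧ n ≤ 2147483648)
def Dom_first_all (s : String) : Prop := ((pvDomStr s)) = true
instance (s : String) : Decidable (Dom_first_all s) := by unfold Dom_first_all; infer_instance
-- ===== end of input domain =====

-- B replaces A's single stateful prev/cur character loop with a two-phase run-length decomposition
-- (compress into maximal class runs, then scan adjacent run pairs); alternative, same cost.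
-- A raises IndexError on the empty string; Pre_ excludes it.


-- ===== PORT A =====
-- the body of A's for-loop: state (letr, num, prev), cur the character at the current index
def aStep (st : List Char × List Char × Char) (cur : Char) : List Char × List Char × Char :=
  if (PySem.Chars.isalpha cur && PySem.Chars.isdigit st.2.2) ||
     (PySem.Chars.isdigit cur && PySem.Chars.isalpha st.2.2) then
    if PySem.Chars.isalpha cur then (st.1 ++ [cur], st.2.1, cur)
    else (st.1, st.2.1 ++ [cur], cur)
  else (st.1, st.2.1, cur)

-- A: prev = s[0] sorts into letr/num, then a loop over range(1, len(s)) with state (letr, num, prev)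
def first_all (s : String) : String :=
  let l := s.toList
  match PySem.List.pyGet? l 0 with
  | none => ""   -- s[0] raises IndexError; excluded by Pre_first_all
  | some p0 =>
    let letr : List Char := if PySem.Chars.isalpha p0 then [p0] else []
    let num : List Char := if PySem.Chars.isalpha p0 then [] else [p0]
    let st := (PySem.List.pyRange 1 (PySem.List.len l) 1).foldl
      (fun st i => aStep st (PySem.List.pyGetD l i ' '))   -- i is always in range here
      (letr, num, p0)
    String.ofList (st.1 ++ st.2.1)

-- ===== PORT B =====
-- _cls: the character's class tag
def clsOf (c : Char) : Char :=
  if PySem.Chars.isalpha c then 'a' else if PySem.Chars.isdigit c then 'd' else 'o'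

-- the body of _runs' loop: skip if the last run has the same class, else append a new run
def runStep (runs : List (Char × Char)) (c : Char) : List (Char × Char) :=
  let k := clsOf c
  match runs.getLast? with
  | some pr => if pr.1 = k then runs else runs ++ [(k, c)]
  | none => [(k, c)]

-- the body of B's loop over zip(runs, runs[1:]): state (letr, num)
def bStep (st : List Char × List Char) (pr : (Char × Char) × (Char × Char)) :
    List Char × List Char :=
  if pr.1.1 = 'd' ∧ pr.2.1 = 'a' then (st.1 ++ [pr.2.2], st.2)
  else if pr.1.1 = 'a' ∧ pr.2.1 = 'd' then (st.1, st.2 ++ [pr.2.2])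
  else st

-- B: compress into maximal class runs, route runs[0] by its class, then scan adjacent run pairs
def first_all_alt (s : String) : String :=
  let runs := s.toList.foldl runStep []
  match runs with
  | [] => ""   -- runs[0] raises IndexError; excluded by Pre_first_all
  | (k0, c0) :: rtl =>
    let letr : List Char := if k0 = 'a' then [c0] else []
    let num : List Char := if k0 = 'a' then [] else [c0]
    let st := (((k0, c0) :: rtl).zip rtl).foldl bStep (letr, num)
    String.ofList (st.1 ++ st.2)

-- ===== PRECONDITION & SPEC =====
-- Pre_ excludes only the empty string, on which A raises IndexError at s[0].
def Pre_first_all (s : String) : Prop := s ≠ ""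
instance (s : String) : Decidable (Pre_first_all s) := by unfold Pre_first_all; infer_instance
def pvWitness_first_all : String := "ab12c!3"

def Spec_first_all (s : String) (out : String) : Prop := out = first_all_alt s
instance (s : String) (out : String) : Decidable (Spec_first_all s out) := by unfold Spec_first_all; infer_instance

-- ===== CLAIM (what is proved, stated in full; the proofs are below) =====
def Claim_equal_first_all : Prop := ∀ (s : String), Dom_first_all s → Pre_first_all s → Spec_first_all s (first_all s)

-- ===== LEMMAS AND PROOFS =====

-- the runs strictly after the initial run of class k
def runsTail (k : Char) : List Char → List (Char × Char)
  | [] => []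
  | c :: rs => if clsOf c = k then runsTail k rs else (clsOf c, c) :: runsTail (clsOf c) rs

-- letr / num contributions of a run list whose previous run has class k
def transL (k : Char) : List (Char × Char) → List Char
  | [] => []
  | p :: tl => (if k = 'd' ∧ p.1 = 'a' then [p.2] else []) ++ transL p.1 tl

def transN (k : Char) : List (Char × Char) → List Char
  | [] => []
  | p :: tl => (if k = 'a' ∧ p.1 = 'd' then [p.2] else []) ++ transN p.1 tl

-- Python's isalpha and isdigit never both hold of one character
theorem alpha_digit_excl (c : Char) :
    ¬(PySem.Chars.isalpha c = true ∧ PySem.Chars.isdigit c = true) := by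
  simp only [PySem.Chars.isalpha, Bool.or_eq_true, PySem.Chars.isdigit, PySem.Chars.isupper,
    PySem.Chars.islower, Bool.and_eq_true, decide_eq_true_eq, not_and,
    Char.le_def, UInt32.le_iff_toNat_le]
  have e0 : '0'.val.toNat = 48 := rfl
  have e9 : '9'.val.toNat = 57 := rfl
  have eA : 'A'.val.toNat = 65 := rfl
  have eZ : 'Z'.val.toNat = 90 := rfl
  have ea : 'a'.val.toNat = 97 := rfl
  have ez : 'z'.val.toNat = 122 := rfl
  intro h h2
  rcases h with ⟨h3, h4⟩ | ⟨h3, h4⟩ <;> omega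

theorem clsOf_eq_a (c : Char) : clsOf c = 'a' ↔ PySem.Chars.isalpha c = true := by
  unfold clsOf
  split_ifs with h1 h2
  · simp [h1]
  · simp [h1]
  · simp [h1]

theorem clsOf_eq_d (c : Char) : clsOf c = 'd' ↔ PySem.Chars.isdigit c = true := by
  unfold clsOf
  split_ifs with h1 h2
  · have hd : PySem.Chars.isdigit c = false := by
      cases h : PySem.Chars.isdigit c
      · rfl
      · exact absurd ⟨h1, h⟩ (alpha_digit_excl c)
    simp [hd]
  · simp [h2]
  · simp [h2]

-- the run builder's foldl, with a nonempty accumulator, appends exactly runsTail of the last run's class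
theorem runs_fold_aux (l : List Char) : ∀ (acc : List (Char × Char)) (pr : Char × Char),
    l.foldl runStep (acc ++ [pr]) = (acc ++ [pr]) ++ runsTail pr.1 l := by
  induction l with
  | nil => intro acc pr; simp [runsTail]
  | cons c rs ih =>
    intro acc pr
    rw [List.foldl_cons]
    by_cases h : clsOf c = pr.1
    · have : runStep (acc ++ [pr]) c = acc ++ [pr] := by
        simp [runStep, h]
      rw [this, ih]; simp [runsTail, h]
    · have : runStep (acc ++ [pr]) c = (acc ++ [pr]) ++ [(clsOf c, c)] := by
        simp [runStep]
        intro he; exact absurd he.symm h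
      rw [this, ih ((acc ++ [pr])) ((clsOf c, c))]
      simp [runsTail, h, List.append_assoc]

-- B's pair-scan fold appends exactly transL / transN
theorem bfold (ys : List (Char × Char)) : ∀ (x : Char × Char) (L N : List Char),
    ((x :: ys).zip ys).foldl bStep (L, N) = (L ++ transL x.1 ys, N ++ transN x.1 ys) := by
  induction ys with
  | nil => intro x L N; simp [transL, transN]
  | cons y tl ih =>
    intro x L N
    rw [List.zip_cons_cons, List.foldl_cons]
    by_cases h1 : x.1 = 'd' ∧ y.1 = 'a'
    · have h2 : ¬(x.1 = 'a' ∧ y.1 = 'd') := by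
        rintro ⟨ha, _⟩; rw [h1.1] at ha; exact absurd ha (by decide)
      have : bStep (L, N) (x, y) = (L ++ [y.2], N) := by simp [bStep, h1]
      rw [this, ih]; simp [transL, transN, h1, h2]
    · by_cases h2 : x.1 = 'a' ∧ y.1 = 'd'
      · have : bStep (L, N) (x, y) = (L, N ++ [y.2]) := by simp [bStep, h1, h2]
        rw [this, ih]; simp [transL, transN, h1, h2]
      · have : bStep (L, N) (x, y) = (L, N) := by simp [bStep, h1, h2]
        rw [this, ih]; simp [transL, transN, h1, h2]

theorem getD_last_cons (c p : Char) (rs : List Char) :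
    ((c :: rs).getLast?).getD p = (rs.getLast?).getD c := by
  cases rs with
  | nil => simp
  | cons d ds =>
    obtain ⟨x, hx⟩ : ∃ x, (d :: ds).getLast? = some x :=
      Option.isSome_iff_exists.mp (by simp [List.getLast?_isSome])
    simp [List.getLast?_cons_cons, hx]

-- A's character loop computes exactly the run-transition contributions
theorem afold (rest : List Char) : ∀ (prev : Char) (L N : List Char),
    rest.foldl aStep (L, N, prev)
      = (L ++ transL (clsOf prev) (runsTail (clsOf prev) rest),
         N ++ transN (clsOf prev) (runsTail (clsOf prev) rest),
         (rest.getLast?).getD prev) := by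
  induction rest with
  | nil => intro prev L N; simp [runsTail, transL, transN]
  | cons c rs ih =>
    intro prev L N
    rw [List.foldl_cons]
    by_cases h : clsOf c = clsOf prev
    · have h1 : ¬(PySem.Chars.isalpha c = true ∧ PySem.Chars.isdigit prev = true) := by
        rintro ⟨ha, hd⟩
        have hc := (clsOf_eq_a c).2 ha
        have hp := (clsOf_eq_d prev).2 hd
        rw [hc, hp] at h; exact absurd h (by decide)
      have h2 : ¬(PySem.Chars.isdigit c = true ∧ PySem.Chars.isalpha prev = true) := by
        rintro ⟨hd, ha⟩
        have hc := (clsOf_eq_d c).2 hd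
        have hp := (clsOf_eq_a prev).2 ha
        rw [hc, hp] at h; exact absurd h (by decide)
      have hstep : aStep (L, N, prev) c = (L, N, c) := by
        simp only [aStep]
        have : ((PySem.Chars.isalpha c && PySem.Chars.isdigit prev) ||
                (PySem.Chars.isdigit c && PySem.Chars.isalpha prev)) = false := by
          cases ha : PySem.Chars.isalpha c <;> cases hd : PySem.Chars.isdigit prev <;>
          cases hb : PySem.Chars.isdigit c <;> cases hp : PySem.Chars.isalpha prev <;>
            simp_all
        rw [this]; simp
      rw [hstep, ih c]
      have ht : runsTail (clsOf prev) (c :: rs) = runsTail (clsOf prev) rs := by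
        simp [runsTail, h]
      rw [ht, ← h, getD_last_cons]
    · have ht : runsTail (clsOf prev) (c :: rs) = (clsOf c, c) :: runsTail (clsOf c) rs := by
        simp [runsTail, h]
      have hLif : (clsOf prev = 'd' ∧ clsOf c = 'a')
          ↔ (PySem.Chars.isalpha c = true ∧ PySem.Chars.isdigit prev = true) := by
        rw [clsOf_eq_d, clsOf_eq_a]; tauto
      have hNif : (clsOf prev = 'a' ∧ clsOf c = 'd')
          ↔ (PySem.Chars.isdigit c = true ∧ PySem.Chars.isalpha prev = true) := by
        rw [clsOf_eq_a, clsOf_eq_d]; tauto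
      by_cases hl : PySem.Chars.isalpha c = true ∧ PySem.Chars.isdigit prev = true
      · have hstep : aStep (L, N, prev) c = (L ++ [c], N, c) := by
          simp [aStep, hl.1, hl.2]
        have hn : ¬(PySem.Chars.isdigit c = true ∧ PySem.Chars.isalpha prev = true) := by
          rintro ⟨hd, _⟩; exact absurd ⟨hl.1, hd⟩ (alpha_digit_excl c)
        rw [hstep, ih c, ht]
        simp only [transL, transN, hLif, hNif, if_pos hl, if_neg hn]
        rw [getD_last_cons]; simp
      · by_cases hn : PySem.Chars.isdigit c = true ∧ PySem.Chars.isalpha prev = true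
        · have hca : PySem.Chars.isalpha c = false := by
            cases hx : PySem.Chars.isalpha c
            · rfl
            · exact absurd ⟨hx, hn.1⟩ (alpha_digit_excl c)
          have hstep : aStep (L, N, prev) c = (L, N ++ [c], c) := by
            simp [aStep, hca, hn.1, hn.2]
          rw [hstep, ih c, ht]
          simp only [transL, transN, hLif, hNif, if_neg hl, if_pos hn]
          rw [getD_last_cons]; simp
        · have hstep : aStep (L, N, prev) c = (L, N, c) := by
            simp only [aStep]
            have : ((PySem.Chars.isalpha c && PySem.Chars.isdigit prev) ||
                    (PySem.Chars.isdigit c && PySem.Chars.isalpha prev)) = false := by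
              cases ha : PySem.Chars.isalpha c <;> cases hd : PySem.Chars.isdigit prev <;>
              cases hb : PySem.Chars.isdigit c <;> cases hp : PySem.Chars.isalpha prev <;>
                simp_all
            rw [this]; simp
          rw [hstep, ih c, ht]
          simp only [transL, transN, hLif, hNif, if_neg hl, if_neg hn]
          rw [getD_last_cons]; simp

-- ===== VERDICT (by name: the statement is the Claim_ definition above) =====
theorem first_all_spec : Claim_equal_first_all := by
  intro s _ hpre
  have hne : s.toList ≠ [] := by
    intro h; exact hpre (by cases s with | _ l => simpa using congrArg String.ofList h)
  unfold Spec_first_all first_all first_all_alt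
  obtain ⟨f, rest, hl⟩ : ∃ f rest, s.toList = f :: rest := by
    cases h : s.toList with
    | nil => exact absurd h hne
    | cons a t => exact ⟨a, t, rfl⟩
  rw [hl]
  have hget : PySem.List.pyGet? (f :: rest) (0 : Int) = some f := by
    simp [PySem.List.pyGet?, PySem.List.pyIdx?]
  have hfold : (PySem.List.pyRange 1 (PySem.List.len (f :: rest)) 1).foldl
      (fun st i => aStep st (PySem.List.pyGetD (f :: rest) i ' '))
      ((if PySem.Chars.isalpha f then [f] else []), (if PySem.Chars.isalpha f then [] else [f]), f)
      = rest.foldl aStep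
        ((if PySem.Chars.isalpha f then [f] else []), (if PySem.Chars.isalpha f then [] else [f]), f) := by
    rw [PySem.List.foldl_pyRange_pyGetD (f :: rest) ' ' aStep _ (by omega : (0:Int) ≤ 1)]
    rfl
  have hruns : (f :: rest).foldl runStep [] = (clsOf f, f) :: runsTail (clsOf f) rest := by
    rw [List.foldl_cons]
    have h0 : runStep [] f = [] ++ [(clsOf f, f)] := by simp [runStep]
    rw [h0, runs_fold_aux]
    simp
  simp only [hget, hfold, hruns, afold, bfold]
  have hk : (clsOf f = 'a') = (PySem.Chars.isalpha f = true) := by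
    rw [eq_iff_iff]; exact clsOf_eq_a f
  by_cases ha : PySem.Chars.isalpha f = true
  · simp [ha, (clsOf_eq_a f).2 ha]
  · have : clsOf f ≠ 'a' := fun hx => ha ((clsOf_eq_a f).1 hx)
    simp [ha, this]
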